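-- pv_equiv track=rewrite | github.com/KrzysMur/Advent-Of-Code-2023 | day_12.py | is_layout_valid
-- ===== SOURCE A (Python) =====
-- def is_layout_valid(sequence: str, block_counts: list[int]):
--     blocks = [block for block in sequence.split(".") if block]
--     if len(blocks) == len(block_counts):
--         for i in range(len(blocks)):
--             if len(blocks[i]) != block_counts[i]:
--                 return False
--         return True
--     return False
-- ===== SOURCE B (Python) =====
-- def is_layout_valid(sequence: str, block_counts: list[int]):
--     j = 0
--     cur = 0
--     for ch in sequence:
--         if ch == '.':
--             if cur:
--                 if j >= len(block_counts) or block_counts[j] != cur: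
--                     return False
--                 j += 1
--                 cur = 0
--         else:
--             cur += 1
--     if cur:
--         if j >= len(block_counts) or block_counts[j] != cur:
--             return False
--         j += 1
--     return j == len(block_counts)
-- ===== Notes on version B (the rewrite author's own statement) =====
-- stated objective: alternative
-- what changed: Replaced split-into-a-block-list-then-index-compare with a single left-to-right character scan that keeps only a running run length and a cursor into block_counts, never materialising the block list.
import Mathlib
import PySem

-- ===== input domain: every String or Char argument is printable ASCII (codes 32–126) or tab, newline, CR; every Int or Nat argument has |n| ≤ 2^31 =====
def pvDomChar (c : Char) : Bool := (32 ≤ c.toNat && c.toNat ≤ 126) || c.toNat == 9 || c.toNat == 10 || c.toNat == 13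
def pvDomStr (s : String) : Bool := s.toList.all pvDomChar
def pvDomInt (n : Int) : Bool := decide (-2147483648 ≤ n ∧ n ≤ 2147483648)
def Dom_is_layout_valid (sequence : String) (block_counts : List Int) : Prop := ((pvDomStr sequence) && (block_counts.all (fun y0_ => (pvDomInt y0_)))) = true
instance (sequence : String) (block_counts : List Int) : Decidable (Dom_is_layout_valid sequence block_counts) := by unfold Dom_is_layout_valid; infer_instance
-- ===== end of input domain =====

-- B replaces split-then-index-compare by a single left-to-right character scan keeping only a
-- running run length and a cursor into block_counts; no block list is built.

-- ===== PORT A =====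
-- 'for i in range(len(blocks)): if len(blocks[i]) != block_counts[i]: return False' as index recursion
def loopA (blocks : List (List Char)) (counts : List Int) (i : Nat) : Bool :=
  if i < blocks.length then
    if PySem.Chars.len (PySem.List.pyGetD blocks (i : Int) []) ≠ PySem.List.pyGetD counts (i : Int) 0 then false
    else loopA blocks counts (i + 1)
  else true
termination_by blocks.length - i

def is_layout_valid (sequence : String) (block_counts : List Int) : Bool :=
  -- blocks = [block for block in sequence.split(".") if block]  (strings kept as List Char)
  let blocks := (PySem.Chars.splitOn sequence.toList ['.']).filter (fun b => b ≠ [])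
  if blocks.length = block_counts.length then loopA blocks block_counts 0
  else false

-- ===== PORT B =====
-- the scan; the Python index j into block_counts is represented by the remaining suffix
-- ('j >= len(block_counts)' = suffix empty, 'block_counts[j]' = its head, final 'j == len' = suffix empty)
def scanB : List Char → List Int → Int → Bool
  | [], counts, cur =>
    if cur ≠ 0 then
      match counts with
      | [] => false
      | c :: rest => if c ≠ cur then false else rest.isEmpty
    else counts.isEmpty
  | ch :: t, counts, cur =>
    if ch = '.' then
      if cur ≠ 0 then
        match counts with
        | [] => false
        | c :: rest => if c ≠ cur then false else scanB t rest 0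
      else scanB t counts 0
    else scanB t counts (cur + 1)

def is_layout_valid_alt (sequence : String) (block_counts : List Int) : Bool :=
  scanB sequence.toList block_counts 0

-- ===== PRECONDITION & SPEC =====
def Spec_is_layout_valid (sequence : String) (block_counts : List Int) (out : Bool) : Prop := out = is_layout_valid_alt sequence block_counts
instance (sequence : String) (block_counts : List Int) (out : Bool) : Decidable (Spec_is_layout_valid sequence block_counts out) := by unfold Spec_is_layout_valid; infer_instance

-- ===== CLAIM (what is proved, stated in full; the proofs are below) =====
def Claim_equal_is_layout_valid : Prop := ∀ (sequence : String) (block_counts : List Int), Dom_is_layout_valid sequence block_counts → Spec_is_layout_valid sequence block_counts (is_layout_valid sequence block_counts)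

-- ===== LEMMAS AND PROOFS =====

-- pieces of cur.reverse ++ l split on '.' (specification of splitOn.go for the one-char separator)
def spA : List Char → List Char → List (List Char)
  | [], cur => [cur.reverse]
  | c :: rest, cur => if c = '.' then cur.reverse :: spA rest [] else spA rest (c :: cur)

-- run lengths of l, with an open run of length cur already in progress
def rlSpec : List Char → Int → List Int
  | [], cur => if cur ≠ 0 then [cur] else []
  | c :: rest, cur =>
    if c = '.' then (if cur ≠ 0 then cur :: rlSpec rest 0 else rlSpec rest 0)
    else rlSpec rest (cur + 1)

theorem go_eq_spA (fuel : Nat) : ∀ (l cur : List Char) (acc : List (List Char)), l.length ≤ fuel →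
    PySem.Chars.splitOn.go ['.'] fuel l cur acc = acc.reverse ++ spA l cur := by
  induction fuel with
  | zero =>
    intro l cur acc h
    have hl : l = [] := by cases l <;> simp_all
    subst hl
    rw [PySem.Chars.splitOn.go.eq_def]
    simp [spA]
  | succ n ih =>
    intro l cur acc h
    cases l with
    | nil =>
      rw [PySem.Chars.splitOn.go.eq_def]
      simp [spA]
    | cons c rest =>
      rw [PySem.Chars.splitOn.go.eq_def]
      by_cases hc : c = '.'
      · subst hc
        have hp : List.isPrefixOf ['.'] ('.' :: rest) = true := by
          simp [List.isPrefixOf]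
        simp only [hp, if_pos]
        rw [ih _ _ _ (by simpa using Nat.le_of_succ_le_succ h)]
        simp [spA]
      · have hp : List.isPrefixOf ['.'] (c :: rest) = false := by
          simp only [List.isPrefixOf, Bool.and_true, beq_eq_false_iff_ne, ne_eq]
          exact fun hh => hc hh.symm
        simp only [hp, Bool.false_eq_true, if_false]
        rw [ih _ _ _ (by simpa using Nat.le_of_succ_le_succ h)]
        simp [spA, hc]

theorem spA_filter_map (l : List Char) : ∀ (cur : List Char),
    ((spA l cur).filter (fun b => b ≠ [])).map (fun b => (b.length : Int)) = rlSpec l (cur.length : Int) := by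
  induction l with
  | nil =>
    intro cur
    by_cases h : cur = [] <;> simp [spA, rlSpec, h]
  | cons c rest ih =>
    intro cur
    by_cases hc : c = '.'
    · have h0 : List.map (fun b => (b.length : Int)) (List.filter (fun b => b ≠ []) (spA rest [])) = rlSpec rest 0 := by
        simpa using ih []
      by_cases h : cur = []
      all_goals simp only [spA, hc, if_pos, rlSpec, ne_eq]
      · simp only [h, List.reverse_nil, List.filter_cons, decide_not]
        simpa using h0
      · simp only [List.filter_cons]
        simp only [ne_eq, decide_not, Bool.not_eq_eq_eq_not, Bool.not_true, decide_eq_false_iff_not,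
          List.reverse_eq_nil_iff] at *
        simp [h]
        simpa using h0
    · have h1 := ih (c :: cur)
      simp only [List.length_cons] at h1
      simp only [spA, hc, rlSpec, ite_false]
      rw [show ((cur.length : Int) + 1) = ((cur.length + 1 : Nat) : Int) by push_cast; ring]
      simpa [hc] using h1

theorem loopA_eq (blocks : List (List Char)) (counts : List Int) :
    ∀ i : Nat, blocks.length = counts.length →
    loopA blocks counts i = decide ((blocks.drop i).map (fun b => (b.length : Int)) = counts.drop i) := by
  intro i h
  induction hn : blocks.length - i generalizing i with
  | zero =>
    have hi : blocks.length ≤ i := by omega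
    rw [loopA]
    simp [Nat.not_lt.mpr hi, List.drop_eq_nil_of_le hi, List.drop_eq_nil_of_le (h ▸ hi)]
  | succ n ih =>
    have hi : i < blocks.length := by omega
    have hi' : i < counts.length := by omega
    rw [loopA]
    rw [List.drop_eq_getElem_cons hi, List.drop_eq_getElem_cons hi']
    simp only [if_pos hi, PySem.List.pyGetD_natCast, PySem.Chars.len_eq,
      List.getD_eq_getElem?_getD, List.getElem?_eq_getElem hi, List.getElem?_eq_getElem hi',
      Option.getD_some, List.map_cons]
    by_cases he : (blocks[i].length : Int) = counts[i]
    · simp only [he, ne_eq, not_true_eq_false, if_false]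
      rw [ih (i+1) (by omega)]
      exact decide_eq_decide.mpr (by rw [List.cons_eq_cons]; tauto)
    · rw [if_pos (by exact he)]
      refine (decide_eq_false ?_).symm
      rw [List.cons_eq_cons]
      tauto

theorem scanB_eq (l : List Char) : ∀ (counts : List Int) (cur : Int),
    scanB l counts cur = decide (rlSpec l cur = counts) := by
  induction l with
  | nil =>
    intro counts cur
    by_cases h : cur = 0
    · cases counts <;> simp [scanB, rlSpec, h]
    · cases counts with
      | nil => simp [scanB, rlSpec, h]
      | cons c rest =>
        by_cases hc : c = cur
        · cases rest <;> simp [scanB, rlSpec, h, hc]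
        · simp [scanB, rlSpec, h, hc, Ne.symm hc]
  | cons ch t ih =>
    intro counts cur
    by_cases hch : ch = '.'
    · by_cases h : cur = 0
      · simp [scanB, rlSpec, hch, h, ih]
      · cases counts with
        | nil => simp [scanB, rlSpec, hch, h]
        | cons c rest =>
          by_cases hc : c = cur
          · simp [scanB, rlSpec, hch, h, hc, ih]
          · simp [scanB, rlSpec, hch, h, hc, Ne.symm hc]
    · simp [scanB, rlSpec, hch, ih]

theorem A_eq (sequence : String) (block_counts : List Int) :
    is_layout_valid sequence block_counts = decide (rlSpec sequence.toList 0 = block_counts) := by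
  unfold is_layout_valid
  have hgo : PySem.Chars.splitOn sequence.toList ['.'] = spA sequence.toList [] := by
    unfold PySem.Chars.splitOn
    rw [go_eq_spA (sequence.toList.length + 1) sequence.toList [] [] (by omega)]
    simp
  have hm : ((spA sequence.toList []).filter (fun b => b ≠ [])).map (fun b => (b.length : Int)) =
      rlSpec sequence.toList 0 := by
    simpa using spA_filter_map sequence.toList []
  simp only [hgo]
  set blocks := (spA sequence.toList []).filter (fun b => b ≠ []) with hb
  by_cases hlen : blocks.length = block_counts.length
  · rw [if_pos hlen, loopA_eq blocks block_counts 0 hlen]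
    simp [hm]
  · rw [if_neg hlen]
    have hne : rlSpec sequence.toList 0 ≠ block_counts := by
      intro he
      apply hlen
      rw [← hm] at he
      simpa using congrArg List.length he
    simp [hne]

-- ===== VERDICT (by name: the statement is the Claim_ definition above) =====
theorem is_layout_valid_spec : Claim_equal_is_layout_valid := by
  intro sequence block_counts _
  unfold Spec_is_layout_valid is_layout_valid_alt
  rw [A_eq, scanB_eq]
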